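-- pv_equiv track=rewrite | github.com/adam-narozniak/NE-Flow-PoA | src/NE_discrete.py | init_partition
-- ===== SOURCE A (Python) =====
-- def init_partition(G, paths, num_people):
--     partition = [0] * len(paths)
--     modulo = num_people % len(paths)
--     for i in range(len(paths)):
--         partition[i] = num_people // len(paths)
--         if i < modulo:
--             partition[i] += 1
--     return partition
-- ===== SOURCE B (Python) =====
-- def init_partition(G, paths, num_people):
--     # Greedy single pass: give each path the ceiling of what is left over the
--     # remaining slots.  Returns [] for empty paths (where A raises
--     # ZeroDivisionError, an input outside the stated Pre_); identical to A elsewhere.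
--     remaining = num_people
--     slots = len(paths)
--     partition = []
--     for _ in paths:
--         take = -(-remaining // slots)
--         partition.append(take)
--         remaining -= take
--         slots -= 1
--     return partition
-- ===== Notes on version B (the rewrite author's own statement) =====
-- stated objective: alternative
-- what changed: Replaces the precomputed quotient/remainder split (num_people//len plus +1 for the first num_people%len indices) by a single greedy pass that assigns each path the ceiling of the people still remaining over the slots still remaining.
import Mathlib
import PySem

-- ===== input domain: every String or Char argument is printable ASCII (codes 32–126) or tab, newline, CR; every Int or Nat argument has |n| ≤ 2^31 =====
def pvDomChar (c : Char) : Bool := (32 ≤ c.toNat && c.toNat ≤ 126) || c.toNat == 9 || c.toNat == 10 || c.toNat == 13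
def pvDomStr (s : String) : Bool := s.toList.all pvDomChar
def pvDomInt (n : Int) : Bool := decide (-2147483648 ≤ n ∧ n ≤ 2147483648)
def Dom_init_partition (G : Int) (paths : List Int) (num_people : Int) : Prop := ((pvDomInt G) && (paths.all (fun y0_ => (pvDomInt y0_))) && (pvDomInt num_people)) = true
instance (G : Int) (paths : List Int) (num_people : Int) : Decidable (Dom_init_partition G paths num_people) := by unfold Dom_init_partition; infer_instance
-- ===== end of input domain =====

-- B replaces A's quotient/remainder split by a greedy pass assigning each path
-- the ceiling of the remaining people over the remaining slots (alternative, same cost).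


-- ===== PORT A =====
def init_partition (G : Int) (paths : List Int) (num_people : Int) : List Int :=
  let n : Int := paths.length
  let modulo := PySem.Int.mod num_people n
  (PySem.List.pyRange 0 n 1).foldl
    (fun partition i =>
      partition ++ [PySem.Int.floordiv num_people n + (if i < modulo then 1 else 0)]) []

-- ===== PORT B =====
def altGo (remaining slots : Int) : List Int → List Int
  | [] => []
  | _ :: rest =>
    let take := -(PySem.Int.floordiv (-remaining) slots)
    take :: altGo (remaining - take) (slots - 1) rest

def init_partition_alt (G : Int) (paths : List Int) (num_people : Int) : List Int :=
  altGo num_people paths.length paths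

-- ===== PRECONDITION & SPEC =====
-- Pre_ excludes exactly the empty path list, on which the Python A raises ZeroDivisionError.
def Pre_init_partition (G : Int) (paths : List Int) (num_people : Int) : Prop := paths ≠ []
instance (G : Int) (paths : List Int) (num_people : Int) : Decidable (Pre_init_partition G paths num_people) := by unfold Pre_init_partition; infer_instance

def pvWitness_init_partition : Int × List Int × Int := (0, [1, 2, 3], 7)

def Spec_init_partition (G : Int) (paths : List Int) (num_people : Int) (out : List Int) : Prop := out = init_partition_alt G paths num_people
instance (G : Int) (paths : List Int) (num_people : Int) (out : List Int) : Decidable (Spec_init_partition G paths num_people out) := by unfold Spec_init_partition; infer_instance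

-- ===== CLAIM (what is proved, stated in full; the proofs are below) =====
def Claim_equal_init_partition : Prop := ∀ (G : Int) (paths : List Int) (num_people : Int), Dom_init_partition G paths num_people → Pre_init_partition G paths num_people → Spec_init_partition G paths num_people (init_partition G paths num_people)


-- ===== LEMMAS AND PROOFS =====

-- the append-fold of A's loop is a map
lemma foldl_append_map (f : Int → Int) (l : List Int) (acc : List Int) :
    l.foldl (fun partition i => partition ++ [f i]) acc = acc ++ l.map f := by
  induction l generalizing acc with
  | nil => simp
  | cons x xs ih => simp [List.foldl, ih]

-- ceiling division vs floor quotient + remainder: the per-entry arithmetic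

lemma head_arith (n k : Int) (hk : 0 < k) :
    -(PySem.Int.floordiv (-n) k)
      = PySem.Int.floordiv n k + (if 0 < PySem.Int.mod n k then 1 else 0) := by
  have hq := PySem.Int.floordiv_mul_add_mod n k
  have hmod : PySem.Int.mod n k = n % k := PySem.Int.mod_eq_emod_of_pos hk
  have hr0 : 0 ≤ n % k := Int.emod_nonneg n (ne_of_gt hk)
  have hr1 : n % k < k := Int.emod_lt_of_pos n hk
  rw [PySem.Int.neg_floordiv_neg_eq_iff_of_pos hk]
  rw [hmod] at hq ⊢
  split_ifs with h <;> constructor <;> nlinarith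

lemma step_arith (n k j : Int) (hk : 1 < k) (hj : 0 ≤ j) :
    PySem.Int.floordiv (n - -(PySem.Int.floordiv (-n) k)) (k - 1)
        + (if j < PySem.Int.mod (n - -(PySem.Int.floordiv (-n) k)) (k - 1) then 1 else 0)
      = PySem.Int.floordiv n k + (if 1 + j < PySem.Int.mod n k then 1 else 0) := by
  have hk0 : (0:Int) < k := by omega
  have hk1 : (0:Int) < k - 1 := by omega
  have hq := PySem.Int.floordiv_mul_add_mod n k
  have hmod : PySem.Int.mod n k = n % k := PySem.Int.mod_eq_emod_of_pos hk0
  have hr0 : 0 ≤ n % k := Int.emod_nonneg n (ne_of_gt hk0)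
  have hr1 : n % k < k := Int.emod_lt_of_pos n hk0
  rw [head_arith n k hk0]
  set q := PySem.Int.floordiv n k with hqdef
  set r := PySem.Int.mod n k with hrdef
  rw [← hmod] at hr0 hr1
  by_cases hr : 0 < r
  · -- take = q + 1 ; n' = (r-1) + (k-1)*q
    rw [if_pos hr]
    have hn' : n - (q + 1) = (r - 1) + (k - 1) * q := by linear_combination -hq
    rw [hn', PySem.Int.floordiv_eq_ediv_of_pos hk1, PySem.Int.mod_eq_emod_of_pos hk1,
      Int.add_mul_ediv_left _ _ (ne_of_gt hk1), Int.add_mul_emod_self_left,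
      Int.ediv_eq_zero_of_lt (by omega) (by omega), Int.emod_eq_of_lt (by omega) (by omega)]
    have hiff : (j < r - 1) ↔ (1 + j < r) := by omega
    simp [hiff]
  · rw [if_neg hr]
    have hr0' : r = 0 := by omega
    have hn' : n - (q + 0) = 0 + (k - 1) * q := by linear_combination -hq + hr0'
    rw [hn', PySem.Int.floordiv_eq_ediv_of_pos hk1, PySem.Int.mod_eq_emod_of_pos hk1,
      Int.add_mul_ediv_left _ _ (ne_of_gt hk1), Int.add_mul_emod_self_left,
      Int.zero_ediv, Int.zero_emod]
    have h1 : ¬ (j < (0:Int)) := by omega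
    have h2 : ¬ (1 + j < r) := by omega
    simp [h1, h2]

lemma altGo_eq (xs : List Int) : ∀ n : Int,
    altGo n xs.length xs
      = (PySem.List.pyRange 0 xs.length 1).map
          (fun i => PySem.Int.floordiv n xs.length
              + if i < PySem.Int.mod n xs.length then 1 else 0) := by
  induction xs with
  | nil =>
    intro n
    simp [altGo, PySem.List.pyRange_one_eq_nil (le_refl 0)]
  | cons x rest ih =>
    intro n
    have hlen : ((x :: rest).length : Int) = (rest.length : Int) + 1 := by
      simp
    set m : Int := (rest.length : Int) with hm
    have hm0 : 0 ≤ m := by positivity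
    rw [hlen, altGo]
    rw [PySem.List.pyRange_one_cons (by omega)]
    rw [List.map_cons]
    congr 1
    · exact head_arith n (m + 1) (by omega)
    · rw [show m + 1 - 1 = m by ring] at *
      rw [ih]
      rw [PySem.List.pyRange_one, PySem.List.pyRange_one]
      simp only [sub_zero, List.map_map]
      have hkt : ((m : Int) + 1 - (0 + 1)).toNat = m.toNat := by omega
      rw [hkt]
      apply List.map_congr_left
      intro j hj
      simp only [Function.comp_apply, zero_add]
      have hj' : (j : Int) < m := by
        simp [List.mem_range] at hj; omega
      have h := step_arith n (m + 1) (j : Int) (by omega) (by positivity)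
      rw [show m + 1 - 1 = m by ring] at h
      simpa using h

-- ===== VERDICT (by name: the statement is the Claim_ definition above) =====
theorem init_partition_spec : Claim_equal_init_partition := by
  intro G paths num_people _ _
  unfold Spec_init_partition init_partition init_partition_alt
  rw [altGo_eq, foldl_append_map]
  simp
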